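-- pv_equiv track=rewrite | github.com/bakunobu/exercise | 1400_basic_tasks/chap_9/ex_9_37.py | find_dif_sides
-- ===== SOURCE A (Python) =====
-- def find_dif_sides(v:int) -> list:
--     sides = []
--     for a in range(1, v+1):
--         for b in range(1, v+1):
--             for c in range(1, v+1):
--                 if a * b * c == v:
--                     s = sorted([a, b, c])
--                     if s not in sides:
--                         sides.append(s)
--     return(sides)
-- ===== SOURCE B (Python) =====
-- def find_dif_sides(v: int) -> list:
--     # Enumerate divisor pairs instead of a cubic brute-force scan:
--     # for each divisor x of v, enumerate divisors y of v//x with x <= y <= z.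
--     sides = []
--     for x in range(1, v + 1):
--         if v % x:
--             continue
--         w = v // x
--         for y in range(x, w + 1):
--             if w % y == 0 and y * y <= w:
--                 sides.append([x, y, w // y])
--     return sides
-- ===== Notes on version B (the rewrite author's own statement) =====
-- stated objective: faster
-- what changed: A brute-forces all (a,b,c) triples in [1,v]^3 and deduplicates sorted triples by list membership; B enumerates only divisors x of v and divisors y of v//x with x <= y <= z = (v//x)//y, emitting each sorted triple exactly once in the same lexicographic order with no dedup pass.
import Mathlib
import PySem

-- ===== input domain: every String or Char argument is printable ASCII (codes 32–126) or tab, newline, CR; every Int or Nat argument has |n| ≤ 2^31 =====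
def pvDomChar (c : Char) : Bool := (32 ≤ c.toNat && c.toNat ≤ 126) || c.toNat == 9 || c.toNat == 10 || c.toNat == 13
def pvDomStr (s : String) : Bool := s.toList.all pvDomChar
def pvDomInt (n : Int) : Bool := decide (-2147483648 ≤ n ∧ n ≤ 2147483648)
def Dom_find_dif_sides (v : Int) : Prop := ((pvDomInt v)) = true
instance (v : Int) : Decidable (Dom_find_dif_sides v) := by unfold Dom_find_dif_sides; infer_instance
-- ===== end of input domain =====

-- B replaces A's cubic brute-force triple scan by enumeration of divisor pairs x ≤ y with z = (v//x)//y (objective: faster).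

-- ===== PORT A =====
def find_dif_sides (v : Int) : List (List Int) :=
  (PySem.List.pyRange 1 (v + 1)).foldl (fun sides a =>
    (PySem.List.pyRange 1 (v + 1)).foldl (fun sides b =>
      (PySem.List.pyRange 1 (v + 1)).foldl (fun sides c =>
        if a * b * c = v then
          PySem.Set.add sides (PySem.List.sorted [a, b, c] (fun x => x))
        else sides) sides) sides) []

-- ===== PORT B =====
def find_dif_sides_alt (v : Int) : List (List Int) :=
  (PySem.List.pyRange 1 (v + 1)).foldl (fun sides x =>
    if PySem.Int.mod v x ≠ 0 then sides
    else
      let w := PySem.Int.floordiv v x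
      (PySem.List.pyRange x (w + 1)).foldl (fun sides y =>
        if PySem.Int.mod w y = 0 ∧ y * y ≤ w then
          sides ++ [[x, y, PySem.Int.floordiv w y]]
        else sides) sides) []

-- ===== PRECONDITION & SPEC =====
def Spec_find_dif_sides (v : Int) (out : List (List Int)) : Prop := out = find_dif_sides_alt v
instance (v : Int) (out : List (List Int)) : Decidable (Spec_find_dif_sides v out) := by unfold Spec_find_dif_sides; infer_instance

-- ===== CLAIM (what is proved, stated in full; the proofs are below) =====
def Claim_equal_find_dif_sides : Prop := ∀ (v : Int), Dom_find_dif_sides v → Spec_find_dif_sides v (find_dif_sides v)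

-- ===== LEMMAS AND PROOFS =====

-- The (sorted) row of solutions with smallest factor a and middle factor y < m, in increasing y.
def rowUpTo (v a m : Int) : List (List Int) :=
  ((PySem.List.pyRange a m).filter (fun y => decide (a * y ∣ v ∧ y * y * a ≤ v))).map
    (fun y => [a, y, v / (a * y)])

-- All rows with smallest factor x < a, concatenated.
def pfx (v a : Int) : List (List Int) :=
  (PySem.List.pyRange 1 a).flatMap (fun x => rowUpTo v x (v + 1))

def canon (v : Int) : List (List Int) := pfx v (v + 1)

-- Named forms of A's loop bodies.
def cstep (v a b : Int) (acc : List (List Int)) : List (List Int) :=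
  (PySem.List.pyRange 1 (v + 1)).foldl (fun acc c =>
    if a * b * c = v then
      PySem.Set.add acc (PySem.List.sorted [a, b, c] (fun x => x))
    else acc) acc

def bstep (v : Int) (acc : List (List Int)) (a : Int) : List (List Int) :=
  (PySem.List.pyRange 1 (v + 1)).foldl (fun acc b => cstep v a b acc) acc

lemma A_def (v : Int) : find_dif_sides v = (PySem.List.pyRange 1 (v + 1)).foldl (bstep v) [] := rfl

-- permutation helpers for three symbolic elements
lemma p_bac (x y z : Int) : [y, x, z].Perm [x, y, z] := List.Perm.swap x y [z]
lemma p_xzy (x y z : Int) : [x, z, y].Perm [x, y, z] := List.Perm.cons x (List.Perm.swap y z [])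
lemma p_yzx (x y z : Int) : [y, z, x].Perm [x, y, z] :=
  (List.Perm.cons y (List.Perm.swap x z [])).trans (List.Perm.swap x y [z])
lemma p_zxy (x y z : Int) : [z, x, y].Perm [x, y, z] :=
  (List.Perm.swap x z [y]).trans (List.Perm.cons x (List.Perm.swap y z []))
lemma p_zyx (x y z : Int) : [z, y, x].Perm [x, y, z] :=
  (List.Perm.swap y z [x]).trans (p_yzx x y z)

lemma sorted3_eq {a b c p q r : Int} (hperm : List.Perm [p, q, r] [a, b, c])
    (h1 : p ≤ q) (h2 : q ≤ r) :
    PySem.List.sorted [a, b, c] (fun x => x) = [p, q, r] := by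
  apply PySem.List.eq_of_perm_of_pairwise_le_of_injective (fun x : Int => x)
    (fun _ _ h => h) ((PySem.List.sorted_perm [a,b,c] (fun x => x) false).trans hperm.symm)
    (PySem.List.sorted_pairwise [a,b,c] (fun x => x))
  exact List.Pairwise.cons (fun y hy => by
      rcases List.mem_cons.mp hy with rfl | hy
      · exact h1
      · rcases List.mem_singleton.mp hy with rfl; exact h1.trans h2)
    (List.Pairwise.cons (fun y hy => by rcases List.mem_singleton.mp hy with rfl; exact h2)
      (List.pairwise_singleton _ _))

lemma filter_unique {l : List Int} {p : Int → Prop} [DecidablePred p] {c₀ : Int}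
    (hnd : l.Nodup) (hm : c₀ ∈ l) (hiff : ∀ c, p c ↔ c = c₀) :
    l.filter (fun c => decide (p c)) = [c₀] := by
  have h : (fun c => decide (p c)) = (fun c => c == c₀) := by
    funext c; by_cases h : c = c₀ <;> simp [hiff, h]
  rw [h, List.filter_beq, List.count_eq_one_of_mem hnd hm, List.replicate_one]

lemma mem_rowUpTo {v x m : Int} (hx : 1 ≤ x) {s : List Int} :
    s ∈ rowUpTo v x m ↔ ∃ y z, x ≤ y ∧ y < m ∧ y ≤ z ∧ x * y * z = v ∧ s = [x, y, z] := by
  unfold rowUpTo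
  simp only [List.mem_map, List.mem_filter, PySem.List.mem_pyRange_one, decide_eq_true_eq]
  constructor
  · rintro ⟨y, ⟨⟨hxy, hym⟩, hd, hle⟩, rfl⟩
    have hy1 : 1 ≤ y := le_trans hx hxy
    have hxy0 : 0 < x * y := by positivity
    refine ⟨y, v / (x * y), hxy, hym, ?_, ?_, rfl⟩
    · rw [Int.le_ediv_iff_mul_le hxy0]; nlinarith
    · exact Int.mul_ediv_cancel' hd
  · rintro ⟨y, z, hxy, hym, hyz, hprod, rfl⟩
    have hy1 : 1 ≤ y := le_trans hx hxy
    have hz1 : 1 ≤ z := le_trans hy1 hyz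
    have hxy0 : x * y ≠ 0 := by positivity
    have hd : x * y ∣ v := ⟨z, hprod.symm⟩
    have hzeq : v / (x * y) = z := by rw [← hprod, Int.mul_ediv_cancel_left _ hxy0]
    refine ⟨y, ⟨⟨hxy, hym⟩, hd, ?_⟩, by rw [hzeq]⟩
    nlinarith [mul_le_mul_of_nonneg_left hyz (by positivity : (0:ℤ) ≤ x * y)]

lemma mem_pfx {v a : Int} {s : List Int} :
    s ∈ pfx v a ↔ ∃ x y z, 1 ≤ x ∧ x < a ∧ x ≤ y ∧ y ≤ z ∧ x * y * z = v ∧ s = [x, y, z] := by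
  unfold pfx
  simp only [List.mem_flatMap, PySem.List.mem_pyRange_one]
  constructor
  · rintro ⟨x, ⟨hx1, hxa⟩, hs⟩
    obtain ⟨y, z, h1, _, h3, h4, h5⟩ := (mem_rowUpTo hx1).mp hs
    exact ⟨x, y, z, hx1, hxa, h1, h3, h4, h5⟩
  · rintro ⟨x, y, z, hx1, hxa, hxy, hyz, hprod, rfl⟩
    have hy1 : 1 ≤ y := le_trans hx1 hxy
    have hz1 : 1 ≤ z := le_trans hy1 hyz
    have hyv : y < v + 1 := by
      have e1 : y ≤ y * z := le_mul_of_one_le_right (by omega) hz1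
      have e2 : y * z ≤ x * (y * z) := le_mul_of_one_le_left (by positivity) hx1
      have e3 : x * (y * z) = v := by rw [← mul_assoc, hprod]
      omega
    exact ⟨x, ⟨hx1, hxa⟩, (mem_rowUpTo hx1).mpr ⟨y, z, hxy, hyv, hyz, hprod, rfl⟩⟩


lemma cstep_eq (v a b : Int) (hv : 1 ≤ v) (ha : 1 ≤ a) (hb : 1 ≤ b) (acc : List (List Int)) :
    cstep v a b acc =
      if a * b ∣ v then
        PySem.Set.add acc (PySem.List.sorted [a, b, v / (a * b)] (fun x => x))
      else acc := by
  unfold cstep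
  rw [PySem.List.foldl_ite_eq_foldl_filter (p := fun c => a * b * c = v)
    (f := fun acc c => PySem.Set.add acc (PySem.List.sorted [a, b, c] (fun x => x)))]
  by_cases hd : a * b ∣ v
  · have hab0 : 0 < a * b := by positivity
    have habv : a * b ≤ v := Int.le_of_dvd (by omega) hd
    have hc1 : 1 ≤ v / (a * b) := by rw [Int.le_ediv_iff_mul_le hab0]; linarith
    have hcd : v / (a * b) ∣ v := ⟨a * b, by rw [mul_comm, Int.mul_ediv_cancel' hd]⟩
    have hcv : v / (a * b) ≤ v := Int.le_of_dvd (by omega) hcd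
    have hmem : v / (a * b) ∈ PySem.List.pyRange 1 (v + 1) :=
      PySem.List.mem_pyRange_one.mpr ⟨hc1, by omega⟩
    have hfil : (PySem.List.pyRange 1 (v + 1)).filter (fun c => decide (a * b * c = v))
        = [v / (a * b)] := by
      refine filter_unique (PySem.List.nodup_pyRange_one 1 (v + 1)) hmem (fun c => ?_)
      constructor
      · rintro h
        rw [← h, Int.mul_ediv_cancel_left _ (by positivity : a * b ≠ 0)]
      · rintro rfl; exact Int.mul_ediv_cancel' hd
    rw [hfil, if_pos hd]
    simp only [List.foldl_cons, List.foldl_nil]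
  · have hfil : (PySem.List.pyRange 1 (v + 1)).filter (fun c => decide (a * b * c = v))
        = [] := by
      simp only [List.filter_eq_nil_iff, decide_eq_true_eq]
      intro c _ h; exact hd ⟨c, h.symm⟩
    rw [hfil, if_neg hd]
    simp only [List.foldl_nil]

lemma rowUpTo_one (v a : Int) (ha : 1 ≤ a) : rowUpTo v a 1 = [] := by
  unfold rowUpTo; rw [PySem.List.pyRange_one_eq_nil ha]; rfl

lemma rowUpTo_succ_lt (v a b : Int) (hba : b < a) : rowUpTo v a (b + 1) = rowUpTo v a b := by
  unfold rowUpTo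
  rw [PySem.List.pyRange_one_eq_nil (by omega), PySem.List.pyRange_one_eq_nil (by omega)]

lemma rowUpTo_succ_no (v a b : Int) (hab : a ≤ b) (h : ¬ (a * b ∣ v ∧ b * b * a ≤ v)) :
    rowUpTo v a (b + 1) = rowUpTo v a b := by
  unfold rowUpTo
  rw [PySem.List.pyRange_one_succ_right hab, List.filter_append, List.map_append]
  have hb : ([b].filter (fun y => decide (a * y ∣ v ∧ y * y * a ≤ v))) = [] := by
    by_cases h1 : a * b ∣ v <;> by_cases h2 : b * b * a ≤ v <;> simp_all
  rw [hb]; simp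

lemma rowUpTo_succ_yes (v a b : Int) (hab : a ≤ b) (h : a * b ∣ v ∧ b * b * a ≤ v) :
    rowUpTo v a (b + 1) = rowUpTo v a b ++ [[a, b, v / (a * b)]] := by
  unfold rowUpTo
  rw [PySem.List.pyRange_one_succ_right hab, List.filter_append, List.map_append]
  have hb : ([b].filter (fun y => decide (a * y ∣ v ∧ y * y * a ≤ v))) = [b] := by
    simp [h.1, h.2]
  rw [hb]; rfl

lemma step_key (v a b : Int) (hv : 1 ≤ v) (ha : 1 ≤ a) (hb : 1 ≤ b) :
    cstep v a b (pfx v a ++ rowUpTo v a b) = pfx v a ++ rowUpTo v a (b + 1) := by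
  rw [cstep_eq v a b hv ha hb]
  by_cases hd : a * b ∣ v
  · rw [if_pos hd]
    have hab0 : 0 < a * b := by positivity
    have hc : a * b * (v / (a * b)) = v := Int.mul_ediv_cancel' hd
    have hc1 : 1 ≤ v / (a * b) := by
      rw [Int.le_ediv_iff_mul_le hab0]
      linarith [Int.le_of_dvd (by omega : (0:ℤ) < v) hd]
    have hbc : b ≤ v / (a * b) ↔ b * b * a ≤ v := by
      rw [Int.le_ediv_iff_mul_le hab0]
      constructor <;> intro h <;> nlinarith
    by_cases hnew : a ≤ b ∧ b ≤ v / (a * b)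
    · have hs : PySem.List.sorted [a, b, v / (a * b)] (fun x => x) = [a, b, v / (a * b)] :=
        sorted3_eq (List.Perm.refl _) hnew.1 hnew.2
      rw [hs]
      have hnm : [a, b, v / (a * b)] ∉ pfx v a ++ rowUpTo v a b := by
        intro hmem
        rcases List.mem_append.mp hmem with hm | hm
        · obtain ⟨x, y, z, _, hxa, _, _, _, he⟩ := mem_pfx.mp hm
          simp only [List.cons.injEq, and_true] at he
          omega
        · obtain ⟨y, z, _, hym, _, _, he⟩ := (mem_rowUpTo ha).mp hm
          simp only [List.cons.injEq, and_true] at he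
          omega
      have hadd : PySem.Set.add (pfx v a ++ rowUpTo v a b) [a, b, v / (a * b)]
          = (pfx v a ++ rowUpTo v a b) ++ [[a, b, v / (a * b)]] := by
        simp [PySem.Set.add, PySem.Set.contains, hnm]
      rw [hadd, rowUpTo_succ_yes v a b hnew.1 ⟨hd, hbc.mp hnew.2⟩, List.append_assoc]
    · have hmem : PySem.List.sorted [a, b, v / (a * b)] (fun x => x)
          ∈ pfx v a ++ rowUpTo v a b := by
        simp only [not_and, not_le] at hnew
        have hcv1 : 1 ≤ v / (a * b) := hc1
        by_cases hba : b < a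
        · by_cases hbc0 : b ≤ v / (a * b)
          · by_cases hac0 : a ≤ v / (a * b)
            · rw [sorted3_eq (p_bac a b (v / (a * b))) (le_of_lt hba) hac0]
              exact List.mem_append.mpr (Or.inl (mem_pfx.mpr
                ⟨b, a, v / (a * b), hb, hba, le_of_lt hba, hac0, by linear_combination hc, rfl⟩))
            · rw [sorted3_eq (p_yzx a b (v / (a * b))) hbc0 (by omega)]
              exact List.mem_append.mpr (Or.inl (mem_pfx.mpr
                ⟨b, v / (a * b), a, hb, hba, hbc0, by omega, by linear_combination hc, rfl⟩))
          · rw [sorted3_eq (p_zyx a b (v / (a * b))) (by omega) (le_of_lt hba)]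
            exact List.mem_append.mpr (Or.inl (mem_pfx.mpr
              ⟨v / (a * b), b, a, hcv1, by omega, by omega, le_of_lt hba,
                by linear_combination hc, rfl⟩))
        · have hab : a ≤ b := by omega
          have hc0b : v / (a * b) < b := hnew hab
          by_cases hc0a : v / (a * b) < a
          · rw [sorted3_eq (p_zxy a b (v / (a * b))) (by omega) hab]
            exact List.mem_append.mpr (Or.inl (mem_pfx.mpr
              ⟨v / (a * b), a, b, hcv1, hc0a, by omega, hab, by linear_combination hc, rfl⟩))
          · rw [sorted3_eq (p_xzy a b (v / (a * b))) (by omega) (by omega)]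
            exact List.mem_append.mpr (Or.inr ((mem_rowUpTo ha).mpr
              ⟨v / (a * b), b, by omega, hc0b, by omega, by linear_combination hc, rfl⟩))
      have hadd : PySem.Set.add (pfx v a ++ rowUpTo v a b)
          (PySem.List.sorted [a, b, v / (a * b)] (fun x => x)) = pfx v a ++ rowUpTo v a b := by
        simp [PySem.Set.add, PySem.Set.contains, hmem]
      rw [hadd]
      by_cases hab : a ≤ b
      · rw [rowUpTo_succ_no v a b hab (fun hcond => by
          simp only [not_and, not_le] at hnew
          exact absurd (hbc.mpr hcond.2) (by omega))]
      · rw [rowUpTo_succ_lt v a b (by omega)]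
  · rw [if_neg hd]
    by_cases hab : a ≤ b
    · rw [rowUpTo_succ_no v a b hab (fun hcond => hd hcond.1)]
    · rw [rowUpTo_succ_lt v a b (by omega)]

lemma bfold (v a : Int) (hv : 1 ≤ v) (ha : 1 ≤ a) :
    ∀ (n : Nat) (b : Int), 1 ≤ b → v + 1 = b + n →
      (PySem.List.pyRange b (v + 1)).foldl (fun acc b => cstep v a b acc)
          (pfx v a ++ rowUpTo v a b)
        = pfx v a ++ rowUpTo v a (v + 1)
  | 0, b, hb, hn => by
      have hbv : b = v + 1 := by omega
      subst hbv
      rw [PySem.List.pyRange_one_eq_nil le_rfl]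
      rfl
  | n + 1, b, hb, hn => by
      rw [PySem.List.pyRange_one_cons (by omega : b < v + 1), List.foldl_cons,
        step_key v a b hv ha hb]
      exact bfold v a hv ha n (b + 1) (by omega) (by omega)

lemma pfx_one (v : Int) : pfx v 1 = [] := by
  unfold pfx; rw [PySem.List.pyRange_one_eq_nil le_rfl]; rfl

lemma pfx_succ (v a : Int) (ha : 1 ≤ a) : pfx v (a + 1) = pfx v a ++ rowUpTo v a (v + 1) := by
  unfold pfx
  rw [PySem.List.pyRange_one_succ_right ha, List.flatMap_append]
  simp

lemma bstep_eq (v a : Int) (hv : 1 ≤ v) (ha : 1 ≤ a) :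
    bstep v (pfx v a) a = pfx v (a + 1) := by
  unfold bstep
  have h0 : pfx v a = pfx v a ++ rowUpTo v a 1 := by rw [rowUpTo_one v a ha]; simp
  rw [h0, bfold v a hv ha v.toNat 1 le_rfl (by omega), pfx_succ v a ha]

lemma afold (v : Int) (hv : 1 ≤ v) :
    ∀ (n : Nat) (a : Int), 1 ≤ a → v + 1 = a + n →
      (PySem.List.pyRange a (v + 1)).foldl (bstep v) (pfx v a) = canon v
  | 0, a, ha, hn => by
      have hav : a = v + 1 := by omega
      subst hav
      rw [PySem.List.pyRange_one_eq_nil le_rfl]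
      rfl
  | n + 1, a, ha, hn => by
      rw [PySem.List.pyRange_one_cons (by omega : a < v + 1), List.foldl_cons,
        bstep_eq v a hv ha]
      exact afold v hv n (a + 1) (by omega) (by omega)

lemma A_eq (v : Int) (hv : 1 ≤ v) : find_dif_sides v = canon v := by
  rw [A_def v]
  have h := afold v hv v.toNat 1 le_rfl (by omega)
  rwa [pfx_one] at h

lemma xstep_eq (v x : Int) (hx1 : 1 ≤ x) (hxv : x ≤ v) (acc : List (List Int)) :
    (if PySem.Int.mod v x ≠ 0 then acc
     else
       let w := PySem.Int.floordiv v x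
       (PySem.List.pyRange x (w + 1)).foldl (fun sides y =>
         if PySem.Int.mod w y = 0 ∧ y * y ≤ w then
           sides ++ [[x, y, PySem.Int.floordiv w y]]
         else sides) acc)
      = acc ++ rowUpTo v x (v + 1) := by
  have hv : 1 ≤ v := by omega
  have hx0 : (0:ℤ) < x := by omega
  by_cases hmod : PySem.Int.mod v x = 0
  · have hd : x ∣ v := (PySem.Int.mod_eq_zero_iff_dvd v x).mp hmod
    have hw : PySem.Int.floordiv v x = v / x := PySem.Int.floordiv_eq_ediv_of_pos hx0
    rw [if_neg (by simp [hmod])]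
    show (PySem.List.pyRange x (PySem.Int.floordiv v x + 1)).foldl (fun sides y =>
        if PySem.Int.mod (PySem.Int.floordiv v x) y = 0 ∧ y * y ≤ PySem.Int.floordiv v x then
          sides ++ [[x, y, PySem.Int.floordiv (PySem.Int.floordiv v x) y]]
        else sides) acc = acc ++ rowUpTo v x (v + 1)
    rw [hw]
    rw [PySem.List.foldl_append_ite
      (p := fun y => PySem.Int.mod (v / x) y = 0 ∧ y * y ≤ v / x)
      (f := fun y => [x, y, PySem.Int.floordiv (v / x) y])]
    congr 1
    have hw1 : 1 ≤ v / x := by rw [Int.le_ediv_iff_mul_le hx0]; linarith [Int.le_of_dvd (by omega : (0:ℤ) < v) hd]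
    have hwv : v / x ≤ v := Int.le_of_dvd (by omega) ⟨x, (Int.ediv_mul_cancel hd).symm⟩
    have hcong : ∀ y, x ≤ y →
        ((PySem.Int.mod (v / x) y = 0 ∧ y * y ≤ v / x) ↔ (x * y ∣ v ∧ y * y * x ≤ v)) := by
      intro y hy
      have h1 : (PySem.Int.mod (v / x) y = 0) ↔ x * y ∣ v := by
        rw [PySem.Int.mod_eq_zero_iff_dvd]; exact Int.dvd_div_iff_mul_dvd hd
      have h2 : (y * y ≤ v / x) ↔ y * y * x ≤ v := Int.le_ediv_iff_mul_le hx0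
      rw [h1, h2]
    have hval : ∀ y, x ≤ y → x * y ∣ v → PySem.Int.floordiv (v / x) y = v / (x * y) := by
      intro y hy hxyd
      have hy0 : (0:ℤ) < y := by omega
      obtain ⟨k, hk⟩ := hxyd
      rw [PySem.Int.floordiv_eq_ediv_of_pos hy0, hk, mul_assoc,
        Int.mul_ediv_cancel_left _ (by positivity : x ≠ 0),
        Int.mul_ediv_cancel_left _ (by omega : y ≠ 0), ← mul_assoc,
        Int.mul_ediv_cancel_left _ (by positivity : x * y ≠ 0)]
    have htail : ∀ (lo hi : Int), v / x < lo →
        (PySem.List.pyRange lo hi).filter (fun y => decide (x * y ∣ v ∧ y * y * x ≤ v)) = [] := by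
      intro lo hi hlo
      simp only [List.filter_eq_nil_iff, decide_eq_true_eq, PySem.List.mem_pyRange_one]
      rintro y ⟨hy1, hy2⟩ ⟨hdv, hle⟩
      have hy0 : 1 ≤ y := by omega
      have hyw : y ≤ v / x := by rw [Int.le_ediv_iff_mul_le hx0]; nlinarith
      omega
    unfold rowUpTo
    by_cases hxw : x ≤ v / x + 1
    · rw [PySem.List.pyRange_one_append x (v / x + 1) (v + 1) hxw (by omega),
        List.filter_append, List.map_append, htail (v / x + 1) (v + 1) (by omega)]
      simp only [List.map_nil, List.append_nil]
      rw [List.filter_congr (fun y hy =>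
        decide_eq_decide.mpr (hcong y (PySem.List.mem_pyRange_one.mp hy).1))]
      apply List.map_congr_left
      intro y hy
      have hm := List.mem_filter.mp hy
      have hyx := (PySem.List.mem_pyRange_one.mp hm.1).1
      have hcd := of_decide_eq_true hm.2
      rw [hval y hyx hcd.1]
    · rw [PySem.List.pyRange_one_eq_nil (by omega : v / x + 1 ≤ x),
        htail x (v + 1) (by omega)]
      simp
  · rw [if_pos hmod]
    have hr : rowUpTo v x (v + 1) = [] := by
      unfold rowUpTo
      have hfil : (PySem.List.pyRange x (v + 1)).filter
          (fun y => decide (x * y ∣ v ∧ y * y * x ≤ v)) = [] := by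
        simp only [List.filter_eq_nil_iff, decide_eq_true_eq]
        rintro y hy ⟨hdv, _⟩
        exact hmod ((PySem.Int.mod_eq_zero_iff_dvd v x).mpr (dvd_trans ⟨y, rfl⟩ hdv))
      rw [hfil]; rfl
    rw [hr]; simp

lemma B_eq (v : Int) : find_dif_sides_alt v = canon v := by
  unfold find_dif_sides_alt
  rw [PySem.List.foldl_congr_mem _ _ (fun acc x => acc ++ rowUpTo v x (v + 1)) _
    (fun acc x hx => by
      obtain ⟨hx1, hxv⟩ := PySem.List.mem_pyRange_one.mp hx
      exact xstep_eq v x hx1 (by omega) acc)]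
  rw [PySem.List.foldl_append_eq_flatMap]
  rfl

-- ===== VERDICT (by name: the statement is the Claim_ definition above) =====
theorem find_dif_sides_spec : Claim_equal_find_dif_sides := by
  intro v _
  show find_dif_sides v = find_dif_sides_alt v
  rw [B_eq]
  by_cases hv : 1 ≤ v
  · exact A_eq v hv
  · rw [A_def, PySem.List.pyRange_one_eq_nil (by omega)]
    unfold canon pfx
    rw [PySem.List.pyRange_one_eq_nil (by omega)]
    rfl
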